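-- pv_equiv track=rewrite | github.com/CitizenCode-temp/flaming-adventure | src/FAMap.py | get_room_walls
-- ===== SOURCE A (Python) =====
-- def get_room_walls(room, no_corners=False):
--     wall_sectors = []
--     xmax = len(room) - 1
--     ymax = len(room[0]) - 1
--     for x in range(len(room)):
--         for y in range(len(room[0])):
--             if no_corners:
--                 if (x in [0, xmax]) != (y in [0, ymax]):
--                     wall_sectors.append((x, y))
--             else:
--                 if (x in [0, xmax]) or (y in [0, ymax]):
--                     wall_sectors.append((x, y))
--     return wall_sectors
-- ===== SOURCE B (Python) =====
-- def get_room_walls(room, no_corners=False):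
--     xmax = len(room) - 1
--     ymax = len(room[0]) - 1
--     if ymax < 0:
--         return []
--     edge_ys = [0] if ymax == 0 else [0, ymax]
--     walls = []
--     for x in range(xmax + 1):
--         if x == 0 or x == xmax:
--             ys = range(1, ymax) if no_corners else range(ymax + 1)
--             walls.extend((x, y) for y in ys)
--         else:
--             walls.extend((x, y) for y in edge_ys)
--     return walls
-- ===== Notes on version B (the rewrite author's own statement) =====
-- stated objective: faster
-- what changed: B enumerates only the perimeter cells directly (full first/last rows, just the two edge columns of each middle row) in the same row-major order, instead of testing every cell of the w*h grid.
import Mathlib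
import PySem

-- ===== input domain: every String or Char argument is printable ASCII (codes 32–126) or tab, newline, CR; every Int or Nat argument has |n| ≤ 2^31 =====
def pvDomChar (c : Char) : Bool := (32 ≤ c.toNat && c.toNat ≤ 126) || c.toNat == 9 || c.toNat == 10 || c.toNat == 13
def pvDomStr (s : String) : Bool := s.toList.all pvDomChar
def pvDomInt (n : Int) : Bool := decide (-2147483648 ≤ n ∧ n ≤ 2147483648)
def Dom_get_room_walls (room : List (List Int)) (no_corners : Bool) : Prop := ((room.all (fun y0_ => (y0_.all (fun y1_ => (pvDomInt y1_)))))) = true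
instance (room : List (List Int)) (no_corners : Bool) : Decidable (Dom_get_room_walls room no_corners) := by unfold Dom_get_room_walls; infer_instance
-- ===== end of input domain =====

-- B enumerates only the perimeter cells directly (full first/last rows, two edge
-- columns of each middle row) in the same row-major order, instead of testing all w*h cells.

-- ===== PORT A =====
-- 'room[0]' raises IndexError on an empty room; Pre_ excludes that input, so headD is exact here.
def get_room_walls (room : List (List Int)) (no_corners : Bool) : List (Int × Int) :=
  let xmax : Int := (room.length : Int) - 1
  let ymax : Int := ((room.headD []).length : Int) - 1
  (PySem.List.pyRange 0 (room.length : Int) 1).foldl (fun acc x =>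
    (PySem.List.pyRange 0 ((room.headD []).length : Int) 1).foldl (fun acc y =>
      if no_corners then
        (if ((x == 0 || x == xmax) != (y == 0 || y == ymax)) then acc ++ [(x, y)] else acc)
      else
        (if ((x == 0 || x == xmax) || (y == 0 || y == ymax)) then acc ++ [(x, y)] else acc)) acc) []

-- ===== PORT B =====
def get_room_walls_alt (room : List (List Int)) (no_corners : Bool) : List (Int × Int) :=
  let xmax : Int := (room.length : Int) - 1
  let ymax : Int := ((room.headD []).length : Int) - 1
  if ymax < 0 then []
  else
    let edge_ys : List Int := if ymax == 0 then [0] else [0, ymax]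
    (PySem.List.pyRange 0 (xmax + 1) 1).foldl (fun acc x =>
      acc ++ (if x == 0 || x == xmax then
                (if no_corners then PySem.List.pyRange 1 ymax 1
                 else PySem.List.pyRange 0 (ymax + 1) 1).map (fun y => (x, y))
              else
                edge_ys.map (fun y => (x, y)))) []

-- ===== PRECONDITION & SPEC =====
-- A (and B) raise IndexError at room[0] on the empty room; that is the only raising input.
def Pre_get_room_walls (room : List (List Int)) (no_corners : Bool) : Prop := room ≠ []
instance (room : List (List Int)) (no_corners : Bool) : Decidable (Pre_get_room_walls room no_corners) := by unfold Pre_get_room_walls; infer_instance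
def pvWitness_get_room_walls : List (List Int) × Bool := ([[0, 1], [2, 3], [4, 5]], true)

def Spec_get_room_walls (room : List (List Int)) (no_corners : Bool) (out : List (Int × Int)) : Prop := out = get_room_walls_alt room no_corners
instance (room : List (List Int)) (no_corners : Bool) (out : List (Int × Int)) : Decidable (Spec_get_room_walls room no_corners out) := by unfold Spec_get_room_walls; infer_instance

-- ===== CLAIM (what is proved, stated in full; the proofs are below) =====
def Claim_equal_get_room_walls : Prop := ∀ (room : List (List Int)) (no_corners : Bool), Dom_get_room_walls room no_corners → Pre_get_room_walls room no_corners → Spec_get_room_walls room no_corners (get_room_walls room no_corners)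

-- ===== LEMMAS AND PROOFS =====

-- the middle-row filter: of [0..n-1] only 0 and n-1 survive
lemma filter_edge (n : Int) (hn : 1 ≤ n) :
    (PySem.List.pyRange 0 n 1).filter (fun y => y == 0 || y == n - 1) =
      if n - 1 = 0 then [0] else [0, n - 1] := by
  rcases eq_or_lt_of_le hn with h1 | h2
  · rw [← h1]; decide
  · have hsplit1 : PySem.List.pyRange 0 n 1 = PySem.List.pyRange 0 1 1 ++ PySem.List.pyRange 1 n 1 :=
      PySem.List.pyRange_one_append 0 1 n (by omega) (by omega)
    have hsplit2 : PySem.List.pyRange 1 n 1 = PySem.List.pyRange 1 (n-1) 1 ++ PySem.List.pyRange (n-1) n 1 :=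
      PySem.List.pyRange_one_append 1 (n-1) n (by omega) (by omega)
    have h01 : PySem.List.pyRange 0 1 1 = [0] := by decide
    have hlast : PySem.List.pyRange (n-1) n 1 = [n-1] := by
      have h := PySem.List.pyRange_one_singleton (n-1)
      rw [show (n-1)+1 = n from by omega] at h
      exact h
    have hmid : (PySem.List.pyRange 1 (n-1) 1).filter (fun y => y == 0 || y == n-1) = [] := by
      apply List.filter_eq_nil_iff.mpr
      intro y hy
      rw [PySem.List.mem_pyRange_one] at hy
      simp only [Bool.or_eq_true, beq_iff_eq, not_or]
      omega
    rw [hsplit1, hsplit2, List.filter_append, List.filter_append, h01, hlast, hmid]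
    have hne : n - 1 ≠ 0 := by omega
    simp [hne]

-- the no-corners edge-row filter: dropping 0 and n-1 from [0..n-1] leaves [1..n-2]
lemma filter_mid (n : Int) (hn : 1 ≤ n) :
    (PySem.List.pyRange 0 n 1).filter (fun y => !(y == 0 || y == n - 1)) =
      PySem.List.pyRange 1 (n - 1) 1 := by
  rcases eq_or_lt_of_le hn with h1 | h2
  · rw [← h1]; decide
  · have hsplit1 : PySem.List.pyRange 0 n 1 = PySem.List.pyRange 0 1 1 ++ PySem.List.pyRange 1 n 1 :=
      PySem.List.pyRange_one_append 0 1 n (by omega) (by omega)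
    have hsplit2 : PySem.List.pyRange 1 n 1 = PySem.List.pyRange 1 (n-1) 1 ++ PySem.List.pyRange (n-1) n 1 :=
      PySem.List.pyRange_one_append 1 (n-1) n (by omega) (by omega)
    have h01 : PySem.List.pyRange 0 1 1 = [0] := by decide
    have hlast : PySem.List.pyRange (n-1) n 1 = [n-1] := by
      have h := PySem.List.pyRange_one_singleton (n-1)
      rw [show (n-1)+1 = n from by omega] at h
      exact h
    have hmid : (PySem.List.pyRange 1 (n-1) 1).filter (fun y => !(y == 0 || y == n-1)) = PySem.List.pyRange 1 (n-1) 1 := by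
      apply List.filter_eq_self.mpr
      intro y hy
      rw [PySem.List.mem_pyRange_one] at hy
      simp only [Bool.not_eq_true', Bool.or_eq_false_iff, beq_eq_false_iff_ne, ne_eq]
      constructor <;> omega
    rw [hsplit1, hsplit2, List.filter_append, List.filter_append, h01, hlast, hmid]
    simp

lemma flatMap_congr' {a b : Type} {l : List a} {f g : a → List b} (h : ∀ x ∈ l, f x = g x) :
    l.flatMap f = l.flatMap g := by
  induction l with
  | nil => rfl
  | cons x t ih =>
    simp only [List.flatMap_cons]
    rw [h x (by simp), ih (fun z hz => h z (by simp [hz]))]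

-- ===== VERDICT (by name: the statement is the Claim_ definition above) =====
theorem get_room_walls_spec : Claim_equal_get_room_walls := by
  intro room nc _ hpre
  unfold Spec_get_room_walls get_room_walls get_room_walls_alt
  have hlen : room.length ≠ 0 := by simpa [List.length_eq_zero_iff] using hpre
  have hW : 1 ≤ (room.length : Int) := by omega
  by_cases hH : (room.headD []).length = 0
  · rw [hH]
    norm_num [PySem.List.pyRange_one_eq_nil, PySem.List.foldl_ignore]
  · have hH1 : 1 ≤ ((room.headD []).length : Int) := by omega
    rw [if_neg (by omega : ¬ ((room.headD []).length : Int) - 1 < 0)]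
    cases nc with
    | false =>
      simp only [Bool.false_eq_true, if_false, PySem.List.foldl_append_if,
        PySem.List.foldl_append_eq_flatMap, List.nil_append, sub_add_cancel]
      apply flatMap_congr'
      intro x hx
      by_cases hedge : (x == 0 || x == (room.length : Int) - 1) = true
      · rw [if_pos hedge]
        rw [List.filter_eq_self.mpr (fun y _ => by simp [hedge])]
      · rw [if_neg hedge]
        have hed : (x == 0 || x == (room.length : Int) - 1) = false := by
          simpa using hedge
        simp only [hed, Bool.false_or]
        rw [filter_edge _ hH1]
        simp [beq_iff_eq]
    | true =>
      simp only [if_true, PySem.List.foldl_append_if,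
        PySem.List.foldl_append_eq_flatMap, List.nil_append, sub_add_cancel]
      apply flatMap_congr'
      intro x hx
      by_cases hedge : (x == 0 || x == (room.length : Int) - 1) = true
      · rw [if_pos hedge]
        simp only [hedge, Bool.true_bne]
        rw [filter_mid _ hH1]
      · rw [if_neg hedge]
        have hed : (x == 0 || x == (room.length : Int) - 1) = false := by
          simpa using hedge
        simp only [hed, Bool.false_bne]
        rw [filter_edge _ hH1]
        simp [beq_iff_eq]
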